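-- pv_equiv track=rewrite | github.com/HamidRezaKhoram/labs | ass2/labs109.py | domino_cycle
-- ===== SOURCE A (Python) =====
-- def domino_cycle(tiles):
--     if len(tiles) == 0:
--         return True
--     if len(tiles) == 0:
--         if tiles[0][0] == tiles[0][1]:
--             return True
--     list1 = [tiles[i][0] for i in range(len(tiles))]
--     list2 = [tiles[i][1] for i in range(len(tiles))]
--
--     list3 = list2[:-1]
--     list3.insert(0, list2[-1])
--     for i in range(len(list3)):
--         if list3[i] != list1[i]:
--             return False
--     return True
-- ===== SOURCE B (Python) =====
-- def domino_cycle(tiles):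
--     if not tiles:
--         return True
--     first = tiles[0][0]
--     prev = tiles[0][1]
--     for a, b in tiles[1:]:
--         if prev != a:
--             return False
--         prev = b
--     return prev == first
-- ===== Notes on version B (the rewrite author's own statement) =====
-- stated objective: simpler
-- what changed: Replaces A's staged construction of three intermediate lists (firsts, seconds, rotated seconds) plus an index scan with a single accumulator pass that threads the previous tile's end value through the list and checks the wrap-around against the saved first value at the end.
import Mathlib
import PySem

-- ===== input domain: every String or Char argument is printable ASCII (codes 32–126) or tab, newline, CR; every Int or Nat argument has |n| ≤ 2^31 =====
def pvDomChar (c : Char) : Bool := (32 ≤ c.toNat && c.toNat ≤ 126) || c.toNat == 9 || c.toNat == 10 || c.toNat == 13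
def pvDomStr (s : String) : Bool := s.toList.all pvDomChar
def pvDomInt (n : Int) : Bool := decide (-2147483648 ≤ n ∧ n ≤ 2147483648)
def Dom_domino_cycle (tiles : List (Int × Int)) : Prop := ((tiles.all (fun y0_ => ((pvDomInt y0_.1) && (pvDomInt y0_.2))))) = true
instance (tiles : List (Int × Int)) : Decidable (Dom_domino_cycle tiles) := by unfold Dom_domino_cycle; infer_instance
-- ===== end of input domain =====

-- B replaces A's three intermediate lists (firsts, seconds, rotated seconds) and
-- index scan with one accumulator pass threading the previous tile's end value
-- and a final wrap-around check; objective: simpler.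
-- ===== PORT A =====
-- port of A: builds list1 (firsts), list2 (seconds), list3 = list2 rotated right
-- by one (last element moved to front), then scans comparing list3[i] with list1[i]
def domino_cycle (tiles : List (Int × Int)) : Bool :=
  if tiles.length == 0 then true
  else
    let list1 := tiles.map (fun t => t.1)
    let list2 := tiles.map (fun t => t.2)
    let list3 := list2.getLastD 0 :: list2.dropLast
    (List.range list3.length).all (fun i => list3.getD i 0 == list1.getD i 0)

-- ===== PORT B =====
-- port of B's loop over tiles[1:]: `prev` is the carried end value, `first` the
-- saved tiles[0][0]; early return False on mismatch, final `prev == first`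
def dcGo (first prev : Int) : List (Int × Int) → Bool
  | [] => prev == first
  | t :: rest => if prev != t.1 then false else dcGo first t.2 rest

def domino_cycle_alt (tiles : List (Int × Int)) : Bool :=
  match tiles with
  | [] => true
  | t :: rest => dcGo t.1 t.2 rest

-- ===== PRECONDITION & SPEC =====
def Spec_domino_cycle (tiles : List (Int × Int)) (out : Bool) : Prop := out = domino_cycle_alt tiles
instance (tiles : List (Int × Int)) (out : Bool) : Decidable (Spec_domino_cycle tiles out) := by unfold Spec_domino_cycle; infer_instance

-- ===== CLAIM (what is proved, stated in full; the proofs are below) =====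
def Claim_equal_domino_cycle : Prop := ∀ (tiles : List (Int × Int)), Dom_domino_cycle tiles → Spec_domino_cycle tiles (domino_cycle tiles)

-- ===== LEMMAS AND PROOFS =====

-- B's accumulator pass succeeds exactly when the chain of seconds (prefixed by
-- prev) equals the chain of firsts (suffixed by first)
lemma dcGo_eq (first prev : Int) : ∀ (l : List (Int × Int)),
    dcGo first prev l = decide (prev :: l.map (fun t => t.2) = l.map (fun t => t.1) ++ [first]) := by
  intro l
  induction l generalizing prev with
  | nil => rw [Bool.eq_iff_iff]; simp [dcGo]
  | cons t rest ih =>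
    simp only [dcGo, List.map_cons, List.cons_append, ih]
    by_cases h : prev = t.1 <;> simp [h]

-- A's index scan over equal-length lists is list equality
lemma all_range_getD_eq (xs ys : List Int) (h : xs.length = ys.length) :
    ((List.range xs.length).all (fun i => xs.getD i 0 == ys.getD i 0)) = decide (xs = ys) := by
  rw [Bool.eq_iff_iff]
  simp only [List.all_eq_true, List.mem_range, beq_iff_eq, decide_eq_true_eq]
  constructor
  · intro hp
    apply List.ext_getElem h
    intro i hi hi'
    have := hp i hi
    rwa [List.getD_eq_getElem xs 0 hi, List.getD_eq_getElem ys 0 hi'] at this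
  · intro he i hi
    rw [he]

lemma main_eq (tiles : List (Int × Int)) : domino_cycle tiles = domino_cycle_alt tiles := by
  cases tiles with
  | nil => rfl
  | cons a l =>
    unfold domino_cycle domino_cycle_alt
    simp only [List.length_cons, Nat.add_one_ne_zero, beq_iff_eq, if_false]
    set s1 : List Int := (a :: l).map (fun t => t.1) with hs1
    set s2 : List Int := (a :: l).map (fun t => t.2) with hs2
    have hlen3 : (s2.getLastD 0 :: s2.dropLast).length = s1.length := by
      simp [hs1, hs2]
    rw [show s2.dropLast.length + 1 = (s2.getLastD 0 :: s2.dropLast).length from by simp]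
    rw [all_range_getD_eq _ _ hlen3, dcGo_eq]
    rw [Bool.eq_iff_iff]
    simp only [decide_eq_true_eq]
    have hs2ne : s2 ≠ [] := by simp [hs2]
    have hsplit : s2.dropLast ++ [s2.getLastD 0] = s2 := by
      have hgl : s2.getLastD 0 = s2.getLast hs2ne := by
        rw [List.getLastD_eq_getLast?, List.getLast?_eq_some_getLast hs2ne]
        rfl
      rw [hgl]
      exact List.dropLast_append_getLast hs2ne
    have hcons : s2 = a.2 :: l.map (fun t => t.2) := by simp [hs2]
    have hs1c : s1 = a.1 :: l.map (fun t => t.1) := by simp [hs1]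
    constructor
    · intro h
      rw [hs1c] at h
      have h1 : s2.getLastD 0 = a.1 := by injection h
      have h2 : s2.dropLast = l.map (fun t => t.1) := by injection h
      rw [← hcons, ← hsplit, h1, h2]
    · intro h
      rw [← hcons, ← hsplit] at h
      have hl : s2.dropLast.length = (l.map (fun t => t.1)).length := by
        simp [hs2]
      obtain ⟨h2, h1⟩ := List.append_inj h (by simpa using hl)
      rw [hs1c, ← h2, List.cons.injEq]
      exact ⟨by injection h1, rfl⟩

-- ===== VERDICT (by name: the statement is the Claim_ definition above) =====
theorem domino_cycle_spec : Claim_equal_domino_cycle := by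
  intro tiles _
  unfold Spec_domino_cycle
  exact main_eq tiles
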